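-- pv_equiv track=rewrite | github.com/esubalew-gosaye/problem-solving | 06-Jul-2024/Minimal string 176988.py | minimal_string_game
-- ===== SOURCE A (Python) =====
-- from collections import Counter
--
-- def minimal_string_game(s):
--     t = []
--     u = []
--     counter = Counter(s)
--
--     for ch in s:
--         t.append(ch)
--         counter[ch] -= 1
--
--         while t and (not any(counter[ch] for ch in counter if ch < t[-1])):
--             u.append(t.pop())
--
--     return ''.join(u)
-- ===== SOURCE B (Python) =====
-- def minimal_string_game(s):
--     # Precompute, right-to-left, the minimum character of the strict suffix after
--     # each position; then one forward pass with a stack (no rescan of a counter).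
--     suf = []
--     m = None
--     for ch in reversed(s):
--         suf.append(m)
--         m = ch if m is None or ch < m else m
--     suf.reverse()
--     t = []
--     u = []
--     for ch, m in zip(s, suf):
--         t.append(ch)
--         while t and (m is None or t[-1] <= m):
--             u.append(t.pop())
--     return ''.join(u)
-- ===== Notes on version B (the rewrite author's own statement) =====
-- stated objective: faster
-- what changed: Replaces A's rescan of the whole Counter at every pop test with a precomputed suffix-minimum array built in one right-to-left pass, so each pop test is a single comparison.
import Mathlib
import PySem

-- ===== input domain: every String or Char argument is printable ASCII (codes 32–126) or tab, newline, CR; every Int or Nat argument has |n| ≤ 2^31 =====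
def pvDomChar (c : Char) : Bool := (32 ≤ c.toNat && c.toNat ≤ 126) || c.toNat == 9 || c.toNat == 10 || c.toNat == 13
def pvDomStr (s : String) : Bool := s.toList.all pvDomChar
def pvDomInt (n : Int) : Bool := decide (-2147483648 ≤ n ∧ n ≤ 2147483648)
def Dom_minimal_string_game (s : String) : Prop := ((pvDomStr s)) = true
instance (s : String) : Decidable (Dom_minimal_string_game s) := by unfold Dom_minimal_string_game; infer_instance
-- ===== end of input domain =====

-- B replaces A's per-pop rescan of the Counter by a precomputed suffix-minimum array (faster), same return value.

-- ===== PORT A =====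
-- inner `while t and not any(counter[ch] for ch in counter if ch < t[-1])`:
-- t is the stack with its top at the head; u accumulates the popped chars in reverse
def pvPopA (counter : PySem.Dict Char Int) : List Char → List Char → List Char × List Char
  | [], u => ([], u)
  | top :: rest, u =>
      if counter.keys.any (fun c => decide (c < top) && !(counter.getD c 0 == 0)) then
        (top :: rest, u)
      else
        pvPopA counter rest (top :: u)

-- the `for ch in s` loop, carrying the mutating counter, stack t and output u
def pvLoopA : List Char → PySem.Dict Char Int → List Char → List Char → List Char
  | [], _, _, u => u
  | ch :: rest, counter, t, u =>
      let counter' := counter.insert ch (counter.getD ch 0 - 1)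
      let p := pvPopA counter' (ch :: t) u
      pvLoopA rest counter' p.1 p.2

def minimal_string_game (s : String) : String :=
  String.ofList (pvLoopA s.toList (PySem.Dict.counter s.toList) [] []).reverse

-- ===== PORT B =====
-- right-to-left pass: for each position, the minimum char of the strict suffix after it
-- (returns the aligned list and the running minimum, like Source B's reversed loop)
def pvSufmin : List Char → List (Option Char) × Option Char
  | [] => ([], none)
  | c :: rest =>
      let p := pvSufmin rest
      (p.2 :: p.1, some (match p.2 with | none => c | some x => if c < x then c else x))

-- `while t and (m is None or t[-1] <= m)`
def pvPopB (m : Option Char) : List Char → List Char → List Char × List Char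
  | [], u => ([], u)
  | top :: rest, u =>
      if (match m with | none => true | some x => decide (top ≤ x)) then
        pvPopB m rest (top :: u)
      else
        (top :: rest, u)

-- `for ch, m in zip(s, suf)`
def pvLoopB : List (Char × Option Char) → List Char → List Char → List Char
  | [], _, u => u
  | (ch, m) :: rest, t, u =>
      let p := pvPopB m (ch :: t) u
      pvLoopB rest p.1 p.2

def minimal_string_game_alt (s : String) : String :=
  String.ofList (pvLoopB (s.toList.zip (pvSufmin s.toList).1) [] []).reverse

-- ===== PRECONDITION & SPEC =====
def Spec_minimal_string_game (s : String) (out : String) : Prop := out = minimal_string_game_alt s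
instance (s : String) (out : String) : Decidable (Spec_minimal_string_game s out) := by unfold Spec_minimal_string_game; infer_instance

-- ===== CLAIM (what is proved, stated in full; the proofs are below) =====
def Claim_equal_minimal_string_game : Prop := ∀ (s : String), Dom_minimal_string_game s → Spec_minimal_string_game s (minimal_string_game s)

-- ===== LEMMAS AND PROOFS =====

-- the second component of pvSufmin is `none` only on the empty list …
theorem pvSufmin_snd_none {l : List Char} (h : (pvSufmin l).2 = none) : l = [] := by
  cases l with
  | nil => rfl
  | cons c rest => simp [pvSufmin] at h

-- … and otherwise it is the minimum of the list
theorem pvSufmin_snd_some : ∀ (l : List Char) (x : Char),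
    (pvSufmin l).2 = some x → x ∈ l ∧ ∀ c ∈ l, x ≤ c := by
  intro l
  induction l with
  | nil => intro x h; simp [pvSufmin] at h
  | cons c rest ih =>
      intro x h
      simp only [pvSufmin] at h
      cases hm : (pvSufmin rest).2 with
      | none =>
          have hrest := pvSufmin_snd_none hm
          subst hrest
          simp only [pvSufmin, Option.some.injEq] at h
          subst h
          simp
      | some y =>
          rw [hm] at h
          simp only [Option.some.injEq] at h
          subst h
          obtain ⟨hy1, hy2⟩ := ih y hm
          by_cases hcy : c < y
          · simp only [if_pos hcy]
            refine ⟨List.mem_cons_self, ?_⟩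
            intro a ha
            rcases List.mem_cons.mp ha with h | h
            · subst h; exact le_refl _
            · exact le_of_lt (lt_of_lt_of_le hcy (hy2 a h))
          · simp only [if_neg hcy]
            refine ⟨List.mem_cons_of_mem _ hy1, ?_⟩
            intro a ha
            rcases List.mem_cons.mp ha with h | h
            · subst h; exact le_of_not_gt hcy
            · exact hy2 a h

-- a key with a nonzero count is in the dict's key list
theorem pvMemKeys (counter : PySem.Dict Char Int) (c : Char)
    (h : counter.getD c 0 ≠ 0) : c ∈ counter.keys := by
  by_contra hmem
  have hcont : counter.contains c = false := by
    cases hc : counter.contains c with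
    | false => rfl
    | true =>
        exact absurd ((by simp [PySem.Dict.contains, PySem.Dict.keys] :
          counter.contains c = true ↔ c ∈ counter.keys).mp hc) hmem
  exact h (PySem.Dict.getD_of_not_contains counter 0 hcont)

-- the two pop conditions agree when the counter counts exactly the suffix `rest`
theorem pvCond_eq (counter : PySem.Dict Char Int) (rest : List Char)
    (hc : ∀ c, counter.getD c 0 = (rest.count c : Int)) (top : Char) :
    (counter.keys.any (fun c => decide (c < top) && !(counter.getD c 0 == 0)))
      = !(match (pvSufmin rest).2 with | none => true | some x => decide (top ≤ x)) := by
  cases hm : (pvSufmin rest).2 with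
  | none =>
      have hrest := pvSufmin_snd_none hm
      subst hrest
      simp only [Bool.not_true]
      rw [List.any_eq_false]
      intro c _
      simp [hc c]
  | some x =>
      obtain ⟨hx1, hx2⟩ := pvSufmin_snd_some rest x hm
      by_cases hle : top ≤ x
      · simp only [decide_eq_true hle, Bool.not_true]
        rw [List.any_eq_false]
        intro c _
        by_cases hct : c < top
        · have : ¬ c ∈ rest := fun hmem => absurd (lt_of_lt_of_le hct (le_trans hle (hx2 c hmem))) (lt_irrefl c)
          have hcnt : rest.count c = 0 := List.count_eq_zero.mpr this
          simp [hc c, hcnt]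
        · simp [hct]
      · have hlt : x < top := lt_of_not_ge hle
        have hne : counter.getD x 0 ≠ 0 := by
          have hp : 0 < rest.count x := List.count_pos_iff.mpr hx1
          rw [hc x]
          simp only [ne_eq, Nat.cast_eq_zero]
          omega
        have hxk := pvMemKeys counter x hne
        have hmatch : (match some x with | none => true | some x => decide (top ≤ x)) = decide (top ≤ x) := rfl
        rw [hmatch, decide_eq_false (not_le.mpr hlt), Bool.not_false, List.any_eq_true]
        exact ⟨x, hxk, by simp [hlt, hne]⟩

-- hence pvPopA and pvPopB agree, whatever the stack
theorem pvPop_eq (counter : PySem.Dict Char Int) (rest : List Char)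
    (hc : ∀ c, counter.getD c 0 = (rest.count c : Int)) (t u : List Char) :
    pvPopA counter t u = pvPopB (pvSufmin rest).2 t u := by
  induction t generalizing u with
  | nil => simp [pvPopA, pvPopB]
  | cons top t' ih =>
      simp only [pvPopA, pvPopB, pvCond_eq counter rest hc top]
      cases hm : (match (pvSufmin rest).2 with | none => true | some x => decide (top ≤ x)) with
      | true => simp [ih]
      | false => simp

-- the outer loops agree as long as the counter counts exactly the remaining suffix
theorem pvLoop_eq : ∀ (rest : List Char) (counter : PySem.Dict Char Int),
    (∀ c, counter.getD c 0 = (rest.count c : Int)) → ∀ (t u : List Char),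
    pvLoopA rest counter t u = pvLoopB (rest.zip (pvSufmin rest).1) t u := by
  intro rest
  induction rest with
  | nil => intro counter _ t u; simp [pvLoopA, pvLoopB]
  | cons ch rest' ih =>
      intro counter hc t u
      have hc' : ∀ c, (counter.insert ch (counter.getD ch 0 - 1)).getD c 0 = (rest'.count c : Int) := by
        intro c
        rw [PySem.Dict.getD_insert]
        by_cases h : c = ch
        · subst h
          rw [if_pos rfl, hc c, List.count_cons_self]
          push_cast
          ring
        · rw [if_neg h, hc c, List.count_cons_of_ne (Ne.symm h)]
      have hz : (pvSufmin (ch :: rest')).1 = (pvSufmin rest').2 :: (pvSufmin rest').1 := by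
        simp [pvSufmin]
      simp only [pvLoopA, hz, List.zip_cons_cons, pvLoopB]
      rw [pvPop_eq _ rest' hc']
      exact ih _ hc' _ _

-- ===== VERDICT (by name: the statement is the Claim_ definition above) =====
theorem minimal_string_game_spec : Claim_equal_minimal_string_game := by
  intro s _
  unfold Spec_minimal_string_game minimal_string_game minimal_string_game_alt
  rw [pvLoop_eq s.toList (PySem.Dict.counter s.toList)
    (fun c => by simp [PySem.Dict.getD_counter]) [] []]
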